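-- pv_equiv track=rewrite | github.com/OFA-Tech/FiapAutoKraft | Console-ComputationalVision/console_computational_vision/presentation/widgets/gcode_sender_panel.py | _format_event_payload
-- ===== SOURCE A (Python) =====
-- def _format_event_payload(name: str, payload: dict) -> str:
--     ordered = dict(payload)
--     ordered.setdefault("event", name)
--     parts: list[str] = []
--     for key in ("timestamp", "thread", "command", "port", "ser_id", "status", "event"):
--         if key in ordered:
--             parts.append(f"{key}={ordered.pop(key)}")
--     for key in sorted(ordered):
--         parts.append(f"{key}={ordered[key]}")
--     return "GRBL_EVENT " + " ".join(parts)
-- ===== SOURCE B (Python) =====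
-- _PRIORITY = ("timestamp", "thread", "command", "port", "ser_id", "status", "event")
--
--
-- def _format_event_payload(name: str, payload: dict) -> str:
--     items = dict(payload)
--     if "event" not in items:
--         items["event"] = name
--     rank = {key: index for index, key in enumerate(_PRIORITY)}
--     fallback = len(_PRIORITY)
--     keys = sorted(items, key=lambda k: (rank.get(k, fallback), "" if k in rank else k))
--     return "GRBL_EVENT " + " ".join(f"{k}={items[k]}" for k in keys)
-- ===== Notes on version B (the rewrite author's own statement) =====
-- stated objective: idiomatic
-- what changed: A's two-phase emission (mutate a dict copy, popping priority keys in tuple order, then sort the leftovers) is replaced by one rank-keyed sort of all keys (priority keys by their index, all others after them alphabetically) and a single join over the sorted key list, with no dict mutation.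
import Mathlib
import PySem

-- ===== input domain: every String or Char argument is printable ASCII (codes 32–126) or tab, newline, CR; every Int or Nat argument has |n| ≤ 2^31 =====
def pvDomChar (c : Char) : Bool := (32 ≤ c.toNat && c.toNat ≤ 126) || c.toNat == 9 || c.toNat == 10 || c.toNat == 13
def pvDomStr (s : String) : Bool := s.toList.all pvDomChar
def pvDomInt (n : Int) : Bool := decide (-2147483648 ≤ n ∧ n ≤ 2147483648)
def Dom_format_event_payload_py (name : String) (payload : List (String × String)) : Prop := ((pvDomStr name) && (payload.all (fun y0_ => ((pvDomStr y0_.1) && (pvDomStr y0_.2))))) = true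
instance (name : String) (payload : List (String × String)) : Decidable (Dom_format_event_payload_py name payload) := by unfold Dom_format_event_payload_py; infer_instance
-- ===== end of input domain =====

-- B replaces A's mutate-and-pop two-phase emission by one rank-keyed sort of all keys (objective: idiomatic; return value only — A never mutates its argument).

-- the priority tuple (module data shared by both ports)
def pvPriority : List String := ["timestamp", "thread", "command", "port", "ser_id", "status", "event"]

-- ===== PORT A =====
def format_event_payload_py (name : String) (payload : List (String × String)) : String :=
  let ordered := PySem.Dict.ofList payload
  let ordered := ordered.setdefault "event" name
  let s := pvPriority.foldl
    (fun (s : List String × PySem.Dict String String) key =>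
      if s.2.contains key then
        match s.2.pop? key with
        | some (v, d') => (s.1 ++ [key ++ "=" ++ v], d')
        | none => s
      else s) ([], ordered)
  let parts := (PySem.List.sorted s.2.keys (fun k => k)).foldl
    (fun parts key => parts ++ [key ++ "=" ++ s.2.getD key ""]) s.1
  "GRBL_EVENT " ++ PySem.Str.join " " parts

-- ===== PORT B =====
def format_event_payload_py_alt (name : String) (payload : List (String × String)) : String :=
  let items := PySem.Dict.ofList payload
  let items := if items.contains "event" then items else items.insert "event" name
  let rank : PySem.Dict String Int :=
    (PySem.List.enumerate pvPriority).foldl (fun d p => d.insert p.2 p.1) PySem.Dict.empty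
  let fallback : Int := (pvPriority.length : Int)
  let keys := PySem.List.sorted2 items.keys
    (fun k => rank.getD k fallback) (fun k => if rank.contains k then "" else k)
  "GRBL_EVENT " ++ PySem.Str.join " " (keys.map (fun k => k ++ "=" ++ items.getD k ""))

-- ===== PRECONDITION & SPEC =====
def Spec_format_event_payload_py (name : String) (payload : List (String × String)) (out : String) : Prop := out = format_event_payload_py_alt name payload
instance (name : String) (payload : List (String × String)) (out : String) : Decidable (Spec_format_event_payload_py name payload out) := by unfold Spec_format_event_payload_py; infer_instance

-- ===== CLAIM (what is proved, stated in full; the proofs are below) =====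
def Claim_equal_format_event_payload_py : Prop := ∀ (name : String) (payload : List (String × String)), Dom_format_event_payload_py name payload → Spec_format_event_payload_py name payload (format_event_payload_py name payload)

-- ===== LEMMAS AND PROOFS =====

-- proof-local helpers mirroring the two ports' bodies
def pvFmt (d : PySem.Dict String String) (k : String) : String := k ++ "=" ++ d.getD k ""

def pvStepA (s : List String × PySem.Dict String String) (key : String) :
    List String × PySem.Dict String String :=
  if s.2.contains key then
    match s.2.pop? key with
    | some (v, d') => (s.1 ++ [key ++ "=" ++ v], d')
    | none => s
  else s

def pvEraseAll (d : PySem.Dict String String) (Q : List String) : PySem.Dict String String :=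
  Q.foldl PySem.Dict.erase d

def pvRank : PySem.Dict String Int :=
  (PySem.List.enumerate pvPriority).foldl (fun d p => d.insert p.2 p.1) PySem.Dict.empty

-- basic dict facts (erase/pop are not covered by PySem's lemma book)
theorem pv_contains_eq_isSome (d : PySem.Dict String String) (k : String) :
    d.contains k = (d.get? k).isSome := by
  obtain ⟨items⟩ := d
  induction items with
  | nil => rfl
  | cons a t ih =>
    simp only [PySem.Dict.contains, PySem.Dict.get?, List.any_cons, List.find?_cons] at *
    by_cases h : (a.1 == k) = true <;> simp [h, ih]

theorem pv_find?_filter_ne (l : List (String × String)) (k k' : String) (h : k' ≠ k) :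
    (l.filter (fun p => !(p.1 == k))).find? (fun p => p.1 == k') = l.find? (fun p => p.1 == k') := by
  induction l with
  | nil => rfl
  | cons a t ih =>
    by_cases hk : a.1 = k
    · have h1 : (a.1 == k) = true := beq_iff_eq.mpr hk
      have h2 : (a.1 == k') = false := by
        refine beq_eq_false_iff_ne.mpr ?_
        intro e; exact h (by rw [← e, hk])
      simp [h1, List.find?_cons, h2, ih]
    · have h1 : (a.1 == k) = false := beq_eq_false_iff_ne.mpr hk
      by_cases h2 : (a.1 == k') = true
      · simp [h1, List.find?_cons, h2]
      · simp only [Bool.not_eq_true] at h2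
        simp [h1, List.find?_cons, h2, ih]

theorem pv_get?_erase_of_ne (d : PySem.Dict String String) (k k' : String) (h : k' ≠ k) :
    (d.erase k).get? k' = d.get? k' := by
  obtain ⟨items⟩ := d
  simp only [PySem.Dict.erase, PySem.Dict.get?]
  rw [pv_find?_filter_ne items k k' h]

theorem pv_getD_erase_of_ne (d : PySem.Dict String String) (k k' : String) (h : k' ≠ k) :
    (d.erase k).getD k' "" = d.getD k' "" := by
  simp only [PySem.Dict.getD, pv_get?_erase_of_ne d k k' h]

theorem pv_contains_erase_of_ne (d : PySem.Dict String String) (k k' : String) (h : k' ≠ k) :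
    (d.erase k).contains k' = d.contains k' := by
  rw [pv_contains_eq_isSome, pv_contains_eq_isSome, pv_get?_erase_of_ne d k k' h]

theorem pv_erase_of_not_contains (d : PySem.Dict String String) (k : String)
    (h : d.contains k = false) : d.erase k = d := by
  obtain ⟨items⟩ := d
  simp only [PySem.Dict.contains, List.any_eq_false] at h
  simp only [PySem.Dict.erase]
  congr 1
  refine List.filter_eq_self.mpr ?_
  intro a ha
  simpa using h a ha

theorem pv_keys_erase (d : PySem.Dict String String) (k : String) :
    (d.erase k).keys = d.keys.filter (fun x => !(x == k)) := by
  obtain ⟨items⟩ := d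
  simp only [PySem.Dict.erase, PySem.Dict.keys]
  induction items with
  | nil => rfl
  | cons a t ih =>
    by_cases h : (a.1 == k) = true <;>
      simp [h, ih]

theorem pv_get?_eraseAll (Q : List String) (d : PySem.Dict String String) (k : String)
    (h : k ∉ Q) : (pvEraseAll d Q).get? k = d.get? k := by
  induction Q generalizing d with
  | nil => rfl
  | cons q Q ih =>
    simp only [List.mem_cons, not_or] at h
    show (pvEraseAll (d.erase q) Q).get? k = d.get? k
    rw [ih (d.erase q) h.2, pv_get?_erase_of_ne d q k h.1]

theorem pv_keys_eraseAll (Q : List String) (d : PySem.Dict String String) :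
    (pvEraseAll d Q).keys = d.keys.filter (fun x => !decide (x ∈ Q)) := by
  induction Q generalizing d with
  | nil => simp [pvEraseAll]
  | cons q Q ih =>
    show (pvEraseAll (d.erase q) Q).keys = _
    rw [ih, pv_keys_erase, List.filter_filter]
    refine List.filter_congr ?_
    intro x _
    by_cases h : x = q
    · subst h; simp
    · simp [h, beq_eq_false_iff_ne.mpr h]

-- A's priority loop, characterised
theorem pv_loopA (Q : List String) (hQ : Q.Nodup) (parts : List String)
    (d : PySem.Dict String String) :
    Q.foldl pvStepA (parts, d) =
      (parts ++ (Q.filter (fun k => d.contains k)).map (pvFmt d), pvEraseAll d Q) := by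
  induction Q generalizing parts d with
  | nil => simp [pvEraseAll]
  | cons q Q ih =>
    obtain ⟨hq, hQ'⟩ := List.nodup_cons.mp hQ
    by_cases hc : d.contains q = true
    · have hs : (d.get? q).isSome = true := by rw [← pv_contains_eq_isSome]; exact hc
      obtain ⟨v, hv⟩ := Option.isSome_iff_exists.mp hs
      have hstep : pvStepA (parts, d) q = (parts ++ [q ++ "=" ++ v], d.erase q) := by
        simp [pvStepA, hc, PySem.Dict.pop?, hv]
      have hfmt : pvFmt d q = q ++ "=" ++ v := by
        simp [pvFmt, PySem.Dict.getD, hv]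
      rw [List.foldl_cons, hstep, ih hQ']
      have hfilter : Q.filter (fun k => (d.erase q).contains k) = Q.filter (fun k => d.contains k) := by
        refine List.filter_congr ?_
        intro x hx
        exact pv_contains_erase_of_ne d q x (fun e => hq (e ▸ hx))
      have hmap : (Q.filter (fun k => d.contains k)).map (pvFmt (d.erase q))
          = (Q.filter (fun k => d.contains k)).map (pvFmt d) := by
        refine List.map_congr_left ?_
        intro x hx
        have hxQ : x ∈ Q := (List.mem_filter.mp hx).1
        simp [pvFmt, pv_getD_erase_of_ne d q x (fun e => hq (e ▸ hxQ))]
      rw [hfilter, hmap, List.filter_cons_of_pos hc]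
      show (parts ++ [q ++ "=" ++ v] ++ _, pvEraseAll (d.erase q) Q) = _
      rw [List.append_assoc]
      simp [hfmt, pvEraseAll]
    · have hc' : d.contains q = false := by simpa using hc
      have hstep : pvStepA (parts, d) q = (parts, d) := by simp [pvStepA, hc']
      rw [List.foldl_cons, hstep, ih hQ' parts d, List.filter_cons_of_neg (by simp [hc'])]
      show _ = (_, pvEraseAll d (q :: Q))
      have : pvEraseAll d (q :: Q) = pvEraseAll (d.erase q) Q := rfl
      rw [this, pv_erase_of_not_contains d q hc']

-- rank facts
theorem pv_rank_keys : pvRank.keys = pvPriority := by decide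

theorem pv_rank_contains (a : String) : pvRank.contains a = decide (a ∈ pvPriority) := by
  rw [PySem.Dict.contains_eq_decide_mem_keys, pv_rank_keys]

theorem pv_rank_getD_of_not_mem (a : String) (ha : a ∉ pvPriority) : pvRank.getD a 7 = 7 := by
  have h : pvRank.get? a = none := by
    rw [PySem.Dict.get?_eq_none_iff_not_mem_keys, pv_rank_keys]; exact ha
  simp [PySem.Dict.getD, h]

theorem pv_rank_getD_lt_of_mem (a : String) (ha : a ∈ pvPriority) : pvRank.getD a 7 < 7 := by
  have h : ∀ a ∈ pvPriority, pvRank.getD a 7 < 7 := by decide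
  exact h a ha

theorem pv_rank_pairwise :
    List.Pairwise (fun a b => pvRank.getD a 7 < pvRank.getD b 7) pvPriority := by decide

-- sorted2 with (Int, String) keys is the lexicographic sort; name its result
theorem pv_sorted2_eq_of_perm_of_pairwise {α : Type} (xs ys : List α)
    (k1 : α → Int) (k2 : α → String) (hp : ys.Perm xs)
    (hw : List.Pairwise (fun a b => k1 a < k1 b ∨ (k1 a = k1 b ∧ k2 a < k2 b)) ys) :
    PySem.List.sorted2 xs k1 k2 = ys := by
  have hb : (fun a b : α => decide (k1 a < k1 b) || (!decide (k1 b < k1 a) && decide (k2 a < k2 b)))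
      = (fun a b : α => decide ((toLex (k1 a, k2 a) : Lex (Int × String)) < toLex (k1 b, k2 b))) := by
    funext a b
    rcases lt_trichotomy (k1 a) (k1 b) with h | h | h
    · simp [Prod.Lex.toLex_lt_toLex, h]
    · simp [Prod.Lex.toLex_lt_toLex, h]
    · simp [Prod.Lex.toLex_lt_toLex, h, lt_asymm h, ne_of_gt h]
  have hs : PySem.List.sorted2 xs k1 k2
      = PySem.List.sorted xs (fun a => (toLex (k1 a, k2 a) : Lex (Int × String))) := by
    rw [PySem.List.sorted_eq_foldl_insertBy]
    show List.foldl (fun acc x => PySem.List.insertBy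
      (fun a b => decide (k1 a < k1 b) || (!decide (k1 b < k1 a) && decide (k2 a < k2 b))) x acc) [] xs = _
    rw [hb]
  rw [hs]
  refine PySem.List.sorted_eq_of_perm_of_pairwise_lt xs ys _ hp ?_
  refine hw.imp ?_
  intro a b h
  exact Prod.Lex.toLex_lt_toLex.mpr h

-- the common dict after `setdefault` / `if not in: insert`
theorem pv_setdefault_eq_if (d : PySem.Dict String String) (k : String) (v : String) :
    d.setdefault k v = if d.contains k then d else d.insert k v := by
  by_cases h : d.contains k = true <;>
    simp [PySem.Dict.setdefault, PySem.Dict.insert, h]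

def pvD (name : String) (payload : List (String × String)) : PySem.Dict String String :=
  (PySem.Dict.ofList payload).setdefault "event" name

theorem pv_nodup (name : String) (payload : List (String × String)) :
    (pvD name payload).keys.Nodup := by
  unfold pvD
  rw [PySem.Dict.keys_setdefault]
  by_cases h : (PySem.Dict.ofList payload).contains "event" = true
  · simp [h, PySem.Dict.nodup_keys_ofList]
  · have h' : "event" ∉ (PySem.Dict.ofList payload).keys := by
      rw [← PySem.Dict.contains_iff_mem_keys]
      simp [h]
    simp [h, List.nodup_append, PySem.Dict.nodup_keys_ofList]
    intro a ha e
    exact h' (e ▸ ha)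

-- each port, rewritten to a closed expression about the common dict
theorem pv_A_eq (name : String) (payload : List (String × String)) :
    format_event_payload_py name payload
    = "GRBL_EVENT " ++ PySem.Str.join " "
        ((pvPriority.filter (fun k => (pvD name payload).contains k)).map (pvFmt (pvD name payload))
         ++ (PySem.List.sorted ((pvD name payload).keys.filter (fun x => !decide (x ∈ pvPriority)))
              (fun k => k)).map (pvFmt (pvD name payload))) := by
  have hnp : pvPriority.Nodup := by decide
  show "GRBL_EVENT " ++ PySem.Str.join " "
      ((PySem.List.sorted (pvPriority.foldl pvStepA ([], pvD name payload)).2.keys (fun k => k)).foldl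
        (fun parts key => parts ++ [key ++ "=" ++ (pvPriority.foldl pvStepA ([], pvD name payload)).2.getD key ""])
        (pvPriority.foldl pvStepA ([], pvD name payload)).1) = _
  rw [pv_loopA pvPriority hnp [] (pvD name payload)]
  rw [PySem.List.foldl_append_singleton_eq_map
    (fun key => key ++ "=" ++ (pvEraseAll (pvD name payload) pvPriority).getD key "")]
  rw [pv_keys_eraseAll]
  simp only [List.nil_append]
  have hm : (PySem.List.sorted ((pvD name payload).keys.filter (fun x => !decide (x ∈ pvPriority)))
        (fun k => k)).map
        (fun key => key ++ "=" ++ (pvEraseAll (pvD name payload) pvPriority).getD key "")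
      = (PySem.List.sorted ((pvD name payload).keys.filter (fun x => !decide (x ∈ pvPriority)))
        (fun k => k)).map (pvFmt (pvD name payload)) := by
    refine List.map_congr_left ?_
    intro x hx
    have hx' : x ∈ (pvD name payload).keys.filter (fun x => !decide (x ∈ pvPriority)) :=
      (PySem.List.mem_sorted _ _ _ _).mp hx
    have hxp : x ∉ pvPriority := by simpa using (List.mem_filter.mp hx').2
    simp [pvFmt, PySem.Dict.getD, pv_get?_eraseAll pvPriority (pvD name payload) x hxp]
  rw [hm]

theorem pv_B_eq (name : String) (payload : List (String × String)) :
    format_event_payload_py_alt name payload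
    = "GRBL_EVENT " ++ PySem.Str.join " "
        ((PySem.List.sorted2 (pvD name payload).keys
            (fun k => pvRank.getD k ((pvPriority.length : Int)))
            (fun k => if pvRank.contains k then "" else k)).map (pvFmt (pvD name payload))) := by
  have hD : (if (PySem.Dict.ofList payload).contains "event" then PySem.Dict.ofList payload
      else (PySem.Dict.ofList payload).insert "event" name) = pvD name payload :=
    (pv_setdefault_eq_if (PySem.Dict.ofList payload) "event" name).symm
  show "GRBL_EVENT " ++ PySem.Str.join " "
      ((PySem.List.sorted2 (if (PySem.Dict.ofList payload).contains "event" then PySem.Dict.ofList payload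
          else (PySem.Dict.ofList payload).insert "event" name).keys
          (fun k => pvRank.getD k ((pvPriority.length : Int)))
          (fun k => if pvRank.contains k then "" else k)).map
        (fun k => k ++ "=" ++ (if (PySem.Dict.ofList payload).contains "event" then PySem.Dict.ofList payload
          else (PySem.Dict.ofList payload).insert "event" name).getD k "")) = _
  rw [hD]
  rfl

-- main parts equality
theorem pv_main (d : PySem.Dict String String) (hnd : d.keys.Nodup) :
    (PySem.List.sorted2 d.keys (fun k => pvRank.getD k ((pvPriority.length : Int)))
      (fun k => if pvRank.contains k then "" else k)).map (pvFmt d)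
    = (pvPriority.filter (fun k => d.contains k)).map (pvFmt d)
      ++ (PySem.List.sorted (d.keys.filter (fun x => !decide (x ∈ pvPriority))) (fun k => k)).map (pvFmt d) := by
  have hlen : ((pvPriority.length : Nat) : Int) = 7 := by decide
  rw [hlen]
  have hnp : pvPriority.Nodup := by decide
  have h1 : (pvPriority.filter (fun k => d.contains k)).Perm
      (d.keys.filter (fun x => decide (x ∈ pvPriority))) := by
    refine (List.perm_ext_iff_of_nodup (hnp.filter _) (hnd.filter _)).mpr ?_
    intro a
    simp only [List.mem_filter, PySem.Dict.contains_eq_decide_mem_keys, decide_eq_true_eq]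
    exact ⟨fun ⟨x, y⟩ => ⟨y, x⟩, fun ⟨x, y⟩ => ⟨y, x⟩⟩
  have h2 : (PySem.List.sorted (d.keys.filter (fun x => !decide (x ∈ pvPriority))) (fun k => k)).Perm
      (d.keys.filter (fun x => !decide (x ∈ pvPriority))) :=
    PySem.List.sorted_perm _ _ _
  have hp : (pvPriority.filter (fun k => d.contains k)
      ++ PySem.List.sorted (d.keys.filter (fun x => !decide (x ∈ pvPriority))) (fun k => k)).Perm d.keys :=
    (h1.append h2).trans (List.filter_append_perm _ d.keys)
  have hw : List.Pairwise
      (fun a b => pvRank.getD a 7 < pvRank.getD b 7 ∨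
        (pvRank.getD a 7 = pvRank.getD b 7 ∧
          (if pvRank.contains a then "" else a) < (if pvRank.contains b then "" else b)))
      (pvPriority.filter (fun k => d.contains k)
        ++ PySem.List.sorted (d.keys.filter (fun x => !decide (x ∈ pvPriority))) (fun k => k)) := by
    refine List.pairwise_append.mpr ⟨?_, ?_, ?_⟩
    · exact (pv_rank_pairwise.filter _).imp (fun h => Or.inl h)
    · have hnk : (d.keys.filter (fun x => !decide (x ∈ pvPriority))).Nodup := hnd.filter _
      have hns : (PySem.List.sorted (d.keys.filter (fun x => !decide (x ∈ pvPriority))) (fun k => k)).Nodup :=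
        (PySem.List.sorted_perm _ _ _).symm.nodup hnk
      have hle : List.Pairwise (fun a b : String => a ≤ b)
          (PySem.List.sorted (d.keys.filter (fun x => !decide (x ∈ pvPriority))) (fun k => k)) :=
        PySem.List.sorted_pairwise _ _
      have hlt : List.Pairwise (fun a b : String => a < b)
          (PySem.List.sorted (d.keys.filter (fun x => !decide (x ∈ pvPriority))) (fun k => k)) :=
        (hle.and hns).imp (fun h => lt_of_le_of_ne h.1 h.2)
      refine hlt.imp_of_mem ?_
      intro a b ha hb hab
      have haP : a ∉ pvPriority := by
        simpa using (List.mem_filter.mp ((PySem.List.mem_sorted _ _ _ _).mp ha)).2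
      have hbP : b ∉ pvPriority := by
        simpa using (List.mem_filter.mp ((PySem.List.mem_sorted _ _ _ _).mp hb)).2
      refine Or.inr ⟨?_, ?_⟩
      · rw [pv_rank_getD_of_not_mem a haP, pv_rank_getD_of_not_mem b hbP]
      · rw [pv_rank_contains a, pv_rank_contains b]
        simpa [haP, hbP] using hab
    · intro a ha b hb
      have haP : a ∈ pvPriority := (List.mem_filter.mp ha).1
      have hbP : b ∉ pvPriority := by
        simpa using (List.mem_filter.mp ((PySem.List.mem_sorted _ _ _ _).mp hb)).2
      refine Or.inl ?_
      rw [pv_rank_getD_of_not_mem b hbP]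
      exact pv_rank_getD_lt_of_mem a haP
  rw [pv_sorted2_eq_of_perm_of_pairwise d.keys _ _ _ hp hw, List.map_append]

-- ===== VERDICT (by name: the statement is the Claim_ definition above) =====
theorem format_event_payload_py_spec : Claim_equal_format_event_payload_py := by
  intro name payload _
  unfold Spec_format_event_payload_py
  rw [pv_A_eq, pv_B_eq, pv_main (pvD name payload) (pv_nodup name payload)]
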